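/-
  THE SPLIT OF `decode_all` (111 instructions, 0x1034a0 … 0x10368c; c/shim.c 58–101) INTO SEVEN SEGMENTS.

  The function's contract `Vorbis.Spec.decode_all.spec` is in Vorbis/Spec/Top.lean. This file holds
    PART 1: general lemmas of the family (from the farm worker of the whole function, all PROVED): the decode-time invariant over a
            change of memory that keeps `*f`, the blocks CONFIG reads, the two tables and the shadow (`da_carry_reads`), and over
            stores INTO THE OUTPUT BUFFER given the clause "no block that CONFIG reads is OUT" (`da_out_stores`: see THE INVARIANT FINDING);
            the inline shadow stores of the PROTECTED frame's prologue / epilogue against `storesMem … F.prologue / F.epilogue`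
            (`da_eqOn_writeLE_congr`, `da_shadow_addr_eq`, `da_shadow_prologue`, `da_shadow_epilogue`, `da_shadow_bounds`); the
            objects of the own frame (`da_stackObj`), the fixed objects under another frame list (`da_fixedLive_push`,
            `da_fixedLive_reframe`), SH7 over a footprint above the tables (`da_consts_kept`);
    PART 2: the assertions at the cut points, all relative to the function's entry state `u` (`R` = `u.reg .rsp`):
            `DFrame` (what every cut point shares, the epilogue's head included) ⊂ `DBody` (the frame loop's state: the decoder object
            `f` in r14, the counters, the decode-time invariant), `AtOpen` (0x10357b = `cut1`, after stb_vorbis_open_memory),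
            `AtLoop k st` (0x1035c5 = `loop1`), `AtGot k st n` (0x1035da = `cut3`, after stb_vorbis_get_frame_float),
            `AtDone st` (0x103640 = `at_103640`, the loop's exit), `AtClosed st` (0x103658 = `cut7`, after stb_vorbis_close),
            `AtEpi` (0x10351d = `at_10351d`, the single epilogue: three paths join);
    PART 3: the claims `Seg1 … Seg7` of the units `decode_all.1 … .7`. The frame loop is cut into ONE ROUND = two segments
            (3: head → after get_frame_float | exit; 4: → head at `k + 1` | exit); the induction on `len − k` is the composition's
            (unit `decode_all.COMPOSITION`).

  THE INVARIANT FINDING OF THIS FUNCTION (closed in freeze-10): segment 4 must re-establish `DecodeInv` after copy_frame has stored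
  into OUT = `[400020H + 4·st, 700000H)`. OUT is a block of `RunBlk A len` (`blockOUT ∈ fixedBlocks len`), and `DecodeInv` knew of the
  blocks that CONFIG reads only `RunBlk A len B` — nothing excluded `B = blockOUT`. `DecodeInv.carry` wants `AllKept`,
  `DecodeInv.frame_stores` wants `StoreOK`: both false for a store into OUT. With the clause `∀ B, ConfigOK.Reads mem f B → B ≠ blockOUT`
  the carry is `da_out_stores` (below); the clause follows (`da_reads_ne_out`) from the field
  `DecodeInv.cfg : ∀ B, ConfigOK.Reads mem f B → A.Blk B` (Vorbis/Spec/DecodeInv.lean, "WHY `cfg`"; design/INVARIANTS-errata.md):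
  segment 4 uses `da_out_stores hdi (da_reads_ne_out hdi hdi.cfg) …`.

  The stack frame (steady `rsp` = `R − 232`: six pushes and `sub rsp, B8H`), offsets from `R`:
    −232 `[rsp]` stored (long)      −224 `[rsp+8]` room = 786424      −216 `[rsp+10H]` out = 400000H
    −204 `[rsp+1CH]` len (int)      −200 `[rsp+20H]` channels         −196 `[rsp+24H]` rate
    −192 `[rsp+28H]` the shadow index `(R − 184) >> 3` (r13 is spilled there while it holds `len` in the loop)
    −184 `[rsp+30H]` THE PROTECTED FRAME's base (magic, description, function)
    −152 error (object +32; `rbx − 60H`)   −136 ch (+48; `rbx − 50H`)   −120 chan (+64; `rbx − 40H`)   −88 a (+96; `rbx − 20H`)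
    −56 = rbx     −48 … −8 the saved rbx rbp r12 r13 r14 r15     0 the return address.
-/
import Asan.CheckWalk
import Vorbis.Spec.Top
import Vorbis.Spec.TopCheck
import Vorbis.Frames
import Vorbis.LabelsAt

open X86 X86.User Asan Vorbis Vorbis.Spec

set_option maxRecDepth 4000
set_option maxHeartbeats 4000000

namespace Vorbis.Spec.decode_all

/-! ### PART 1. General lemmas -/

/-- The output buffer is one of the fixed objects, hence an allocated block of the run's predicate. -/
theorem da_out_runBlk (Ar : Arena) (len : Nat) : RunBlk Ar len blockOUT := by
  apply runBlk_extra
  unfold fixedBlocks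
  exact List.mem_cons_of_mem _ List.mem_cons_self

/-- **The decode-time invariant over a change of memory that keeps `*f`, every block CONFIG reads, the two constant tables and
the shadow** (same list of frames; the counters may change to any `0 ≤ stored' ≤ room'`): `DecodeInv.carry` asks for
`AllKept (RunBlk Ar len)`, which is FALSE over copy_frame's stores (the output buffer is an allocated block of `RunBlk`); this is
what is really needed. -/
theorem da_carry_reads {others : List Obj} {frames : List (Nat × FrameLayout)} {len : Nat} {Ar : Arena} {stored room : Int}
    {ysz : Nat → Nat} {mem mem' : Mem} {f : Nat}
    (h : DecodeInv others frames len Ar stored room ysz mem f)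
    (hsh : Mem.EqOn 0xC00000 0xE00000 mem mem')
    (hko : (objBlock f).Kept mem mem')
    (hkR : ∀ B, ConfigOK.Reads mem f B → B.Kept mem mem')
    (k1 : (Block.mk Vorbis.Globals.log2_4.beg Vorbis.Globals.log2_4.size).Kept mem mem')
    (k2 : (Block.mk Vorbis.Globals.range_list.beg Vorbis.Globals.range_list.size).Kept mem mem')
    {stored' room' : Int} (hs0 : 0 ≤ stored') (hs1 : stored' ≤ room') :
    DecodeInv others frames len Ar stored' room' ysz mem' f := by
  have hcfg := h.config
  have he : ObjEq ConfigOK.wins mem f mem' f := ObjEq.of_kept_obj hko (by decide)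
  have hsame : ObjSame f mem mem' := ObjSame.of_same hko.same hko.inside
  have hfk : (floorBlock mem f).Kept mem mem' := hkR _ ConfigOK.Reads.floor
  refine ⟨⟨h.fb.env.eqOn hsh, ?_, ?_, hs0, hs1⟩, ?_, h.hand, h.obj, h.buf_transfer he, h.consts.kept k1 k2,
    h.fy_transfer he hfk, h.cfg_transfer he hkR⟩
  · exact Real.VorbisOK.frame h.fb.vorbis hsame hkR
  · exact ADO.transfer h.fb.ado (ObjEq.of_kept_obj hko (by decide))
  · exact h.sep.frame hcfg he hkR

/-- **THE CLAUSE "NO BLOCK THAT CONFIG READS IS THE OUTPUT BUFFER" AS A HYPOTHESIS** (`hmiss` := `da_reads_ne_out h h.cfg`): with it the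
decode-time invariant survives a batch of stores into OUT that leaves the shadow alone — copy_frame's footprint in decode_all's loop
(0x1035fa), before the next `call stb_vorbis_get_frame_float` (0x1035d5). Without `hmiss` the goal `B.Kept mem mem'` for
`B = blockOUT` is false. -/
theorem da_out_stores {others : List Obj} {frames : List (Nat × FrameLayout)} {len : Nat} {Ar : Arena} {stored room : Int}
    {ysz : Nat → Nat} {mem mem' : Mem} {f : Nat}
    (h : DecodeInv others frames len Ar stored room ysz mem f)
    (hmiss : ∀ B, ConfigOK.Reads mem f B → B ≠ blockOUT)
    {spans : List Span} (hs : Mem.SameExcept spans mem mem')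
    (hw : ∀ s, s ∈ spans → 0x400000 ≤ s.lo ∧ s.hi ≤ 0x700000)
    (hsh : Mem.EqOn 0xC00000 0xE00000 mem mem')
    {stored' room' : Int} (hs0 : 0 ≤ stored') (hs1 : stored' ≤ room') :
    DecodeInv others frames len Ar stored' room' ysz mem' f := by
  have hok := h.ok
  have hOUT : RunBlk Ar len blockOUT := da_out_runBlk Ar len
  -- every allocated block other than OUT is kept
  have hkept : ∀ B, RunBlk Ar len B → B ≠ blockOUT → B.Kept mem mem' := by
    intro B hB hne
    have hd := hok.disjoint hB hOUT hne
    apply Block.Kept.of_sameExcept hs _ (hok.no_wrap hB)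
    intro w hwm
    obtain ⟨w1, w2⟩ := hw w hwm
    simp only [vblock, blockOUT] at hd
    omega
  have hobjne : objBlock f ≠ blockOUT := by
    intro e
    have hr := h.arena.block_range (p := f) (n := Off.sizeof.stb_vorbis) h.obj
    have ho := h.hand.outside blockOUT (by unfold fixedBlocks; exact List.mem_cons_of_mem _ List.mem_cons_self)
    have e1 : f = 0x400000 := congrArg Block.base e
    simp only [blockOUT, voff] at hr ho
    have hl := le_r8 1808
    have h2 := h.arena.AR2
    omega
  refine da_carry_reads h hsh (hkept _ h.ob1 hobjne) ?_ ?_ ?_ hs0 hs1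
  · intro B hR
    exact hkept B (h.config.reads_blk hR) (hmiss B hR)
  · refine hkept _ (runBlk_global Ar len log2_4_global) ?_
    intro e
    have e1 := congrArg Block.base e
    simp only [blockOUT, Vorbis.Globals.log2_4] at e1
    omega
  · refine hkept _ (runBlk_global Ar len range_list_global) ?_
    intro e
    have e1 := congrArg Block.base e
    simp only [blockOUT, Vorbis.Globals.range_list] at e1
    omega

/-- **The field `cfg` of `DecodeInv` implies the missing clause**: if every block CONFIG reads is a block of the ARENA (`hcfg` :=
`h.cfg`; `StartDecoder.Done.reads_arena` proves it at start_decoder's exit), then none of them is the output buffer, which lies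
outside the arena (`Hand.outside`). -/
theorem da_reads_ne_out {others : List Obj} {frames : List (Nat × FrameLayout)} {len : Nat} {Ar : Arena} {stored room : Int}
    {ysz : Nat → Nat} {mem : Mem} {f : Nat}
    (h : DecodeInv others frames len Ar stored room ysz mem f)
    (hcfg : ∀ B, ConfigOK.Reads mem f B → Ar.Blk B) :
    ∀ B, ConfigOK.Reads mem f B → B ≠ blockOUT := by
  intro B hR e
  have hb : Ar.Blk blockOUT := e ▸ hcfg B hR
  have hr := h.arena.block_range (p := blockOUT.base) (n := blockOUT.size) hb
  have ho := h.hand.outside blockOUT (by unfold fixedBlocks; exact List.mem_cons_of_mem _ List.mem_cons_self)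
  have hl := le_r8 blockOUT.size
  have h2 := h.arena.AR2
  simp only [blockOUT] at hr ho hl
  omega

/-! #### The protected frame: the walker's memory after the prologue / epilogue and `storesMem` -/

/-- One more store at the SAME place on both sides keeps two memories equal at a byte. -/
theorem da_read_writeLE_congr (μ ν : Mem) (a : Word) (n v : Nat) (b : Word) (h : ν.read b = μ.read b) :
    (ν.writeLE a n v).read b = (μ.writeLE a n v).read b := by
  induction n generalizing μ ν a v with
  | zero => exact h
  | succ n ih =>
    simp only [Mem.writeLE]
    apply ih
    by_cases e : a = b
    · subst e
      rw [Mem.read_write_same, Mem.read_write_same]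
    · rw [Mem.read_write_other _ _ _ _ e, Mem.read_write_other _ _ _ _ e]
      exact h

/-- One more store at the same place on both sides keeps two memories equal on a region (the inline shadow stores of a
prologue / epilogue: `storesMem` on the left, the walker's nest on the right). -/
theorem da_eqOn_writeLE_congr {lo hi : Nat} {μ ν : Mem} (h : Mem.EqOn lo hi μ ν) {a a' : Word} (e : a = a') (n v : Nat) :
    Mem.EqOn lo hi (μ.writeLE a n v) (ν.writeLE a' n v) := by
  subst e
  exact fun b h1 h2 => da_read_writeLE_congr μ ν a n v b (h b h1 h2)

/-- The address of the shadow byte of granule `base / 8 + i` as decode_all computes it: `r13 = (R − 184) >> 3`, then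
`[r13 + C00000H + i]`. -/
theorem da_shadow_addr_eq (r c : Word) (i : Nat) (h1 : 184 ≤ r.toNat) (hc : c.toNat = 0xC00000 + i) :
    shadowAddr ((r.toNat - 184) / 8 + i) = (r - 184) >>> 3 + c := by
  apply UInt64.toNat_inj.mp
  have e0 : (r - 184).toNat = r.toNat - 184 := by
    rw [UInt64.toNat_sub_of_le]
    · rfl
    · show (184 : UInt64).toNat ≤ r.toNat
      exact h1
  have e : ((r - 184) >>> 3).toNat = (r.toNat - 184) / 8 := by
    rw [UInt64.toNat_shiftRight, e0]
    show (r.toNat - 184) >>> 3 = (r.toNat - 184) / 8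
    rw [Nat.shiftRight_eq_div_pow]
  unfold shadowAddr
  rw [UInt64.toNat_add, e, hc, UInt64.toNat_ofNat']
  omega

/-- **The shadow layer after decode_all's prologue**, for any memory whose shadow is that of the four inline stores: the frame
`(R − 184, Frames.decode_all)` is the innermost active frame, the clean stack ends at `top'`. -/
theorem da_shadow_prologue {others : List Obj} {frames : List (Nat × FrameLayout)} {u : State} {mem' : Mem}
    (hsh : ShadowPre others frames u)
    (heq : Mem.EqOn 0xC00000 0xE00000
      (storesMem u.mem (((u.reg .rsp).toNat - 184) / 8) Vorbis.Frames.decode_all.prologue) mem')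
    (top' : Nat) (ht : top' ≤ (u.reg .rsp).toNat - 184) (h8 : top' % 8 = 0) (hlo : 0x700000 ≤ top') :
    ShadowInv others (((u.reg .rsp).toNat - 184, Vorbis.Frames.decode_all) :: frames) top' mem' := by
  have hsp := hsh.rsp
  have hpro := hsh.inv.prologue_ra (top' := top') Vorbis.Frames.decode_all_ok (by omega) ht h8 hlo
  exact hpro.untouched heq

/-- More active frames: every live object is still one. -/
theorem da_objs_push {others : List Obj} {frames : List (Nat × FrameLayout)} (bF : Nat × FrameLayout) :
    ∀ o, o ∈ stackObjs frames ++ others → o ∈ stackObjs (bF :: frames) ++ others := by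
  intro o ho
  obtain ⟨b, F⟩ := bF
  rw [stackObjs_cons, List.append_assoc]
  exact List.mem_append_right _ ho

/-- The fixed objects stay live under one more active frame. -/
theorem da_fixedLive_push {len : Nat} {others : List Obj} {frames : List (Nat × FrameLayout)}
    (h : Top.FixedLive len others frames) (bF : Nat × FrameLayout) : Top.FixedLive len others (bF :: frames) := by
  have hsub := da_objs_push (others := others) (frames := frames) bF
  have hl : ∀ x, LiveSet others frames x → LiveSet others (bF :: frames) x := by
    intro x hx
    obtain ⟨o, ho, hb⟩ := hx
    exact ⟨o, hsub o ho, hb⟩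
  exact ⟨BlkLive.mono h.blk hl, fun hp => (h.inp hp).mono hsub, h.out.mono hsub, h.globals⟩

/-- An object of decode_all's own frame is a live stack object of the frame list. -/
theorem da_stackObj {others : List Obj} {frames : List (Nat × FrameLayout)} {base : Nat} (off size : Nat)
    (ho : (⟨base + off, size, .stack⟩ : Obj) ∈ Vorbis.Frames.decode_all.objsAt base)
    (hlo : 0x700000 ≤ base) (hhi : base + 128 ≤ 0x800000) (hin : off + size ≤ 128) :
    StackObj others ((base, Vorbis.Frames.decode_all) :: frames) (base + off) size := by
  refine ⟨⟨⟨base + off, size, .stack⟩, ?_, Nat.le_refl _, Nat.le_refl _⟩, by omega, by omega⟩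
  rw [stackObjs_cons, List.append_assoc]
  exact List.mem_append_left _ ho

/-- The 32-bit value of an `int` argument register whose signed value is 400000H (`arena_len`). -/
theorem da_part32_of_s32 (w : Word) (h : s32 w = 4194304) : (Word.part .w32 w).toNat = 4194304 := by
  have hc := BitVec.toInt_eq_toNat_cond (Word.part .w32 w)
  have hlt := (Word.part .w32 w).isLt
  unfold s32 at h
  split at hc <;> omega

/-- The 32-bit value of the `int` argument `len` (`mov [rsp+1CH], esi` stores it; `0 ≤ len ≤ 1FF000H`). -/
theorem da_part32_len (w : Word) (len : Nat) (h : s32 w = (len : Int)) (hlen : len ≤ 0x1FF000) :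
    (Word.part .w32 w).toNat = len := by
  have hc := BitVec.toInt_eq_toNat_cond (Word.part .w32 w)
  have hlt := (Word.part .w32 w).isLt
  unfold s32 at h
  split at hc <;> omega

/-- SH7 over a footprint whose windows all lie above the two constant tables (the stack, the shadow, the arena, OUT,
`crc_table`). -/
theorem da_consts_kept {mem mem' : Mem} (h : Consts mem) {ws : List Span} (hs : Mem.SameExcept ws mem mem')
    (hw : ∀ w, w ∈ ws → 0x120650 ≤ w.lo) : Consts mem' := by
  refine h.kept ?_ ?_
  · refine Block.Kept.of_sameExcept hs ?_ (by decide)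
    intro w hwm
    have := hw w hwm
    simp only [Vorbis.Globals.log2_4]
    omega
  · refine Block.Kept.of_sameExcept hs ?_ (by decide)
    intro w hwm
    have := hw w hwm
    simp only [Vorbis.Globals.range_list]
    omega

/-- `r13 = (R − 184) >> 3` as a number (the form `u_omega` reads: it does not see through `>>>`). -/
theorem da_shr3 (r : Word) (h1 : 184 ≤ r.toNat) : ((r - 184) >>> 3).toNat = (r.toNat - 184) / 8 := by
  have e0 : (r - 184).toNat = r.toNat - 184 := by
    rw [UInt64.toNat_sub_of_le]
    · rfl
    · show (184 : UInt64).toNat ≤ r.toNat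
      exact h1
  rw [UInt64.toNat_shiftRight, e0]
  show (r.toNat - 184) >>> 3 = (r.toNat - 184) / 8
  rw [Nat.shiftRight_eq_div_pow]

/-- The address of an inline shadow store of decode_all as a number (give the four instances as facts before the walk: `u_omega`
proves `x ≤ (… >>> 3 + c).toNat` alone, but not a disjunction of two such bounds — the disjointness of a stack slot and a shadow
store that `u_resolve` / the walker's loads need — unless a fact about this `toNat` is in the context). -/
theorem da_shadow_toNat (r c : Word) (i : Nat) (h1 : 184 ≤ r.toNat) (h2 : r.toNat < 2 ^ 32)
    (hc : c.toNat = 0xC00000 + i) (hi : i < 16) :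
    ((r - 184) >>> 3 + c).toNat = (r.toNat - 184) / 8 + 0xC00000 + i := by
  rw [UInt64.toNat_add, da_shr3 r h1, hc]
  omega

/-- The same as bounds, without a division (cheap for `u_omega` when kept in the context of a whole walk): the address of an
inline shadow store lies in the shadow of the stack region. -/
theorem da_shadow_bounds (r c : Word) (i : Nat) (h1 : 0x700000 + 184 ≤ r.toNat) (h2 : r.toNat ≤ 0x800000)
    (hc : c.toNat = 0xC00000 + i) (hi : i < 16) :
    0xCE0000 ≤ ((r - 184) >>> 3 + c).toNat ∧ ((r - 184) >>> 3 + c).toNat + 16 ≤ 0xD00010 := by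
  rw [da_shadow_toNat r c i (by omega) (by omega) hc hi]
  omega

/-- **The fixed objects are live under ANY list of frames** (decode_all's own frame popped before the `ret`): none of their bytes
is a stack object's, so each byte is in one of the `others`. -/
theorem da_fixedLive_reframe {len : Nat} {others : List Obj} {frames frames' : List (Nat × FrameLayout)} {top : Nat}
    {mem : Mem} (h : Top.FixedLive len others frames) (hinv : ShadowInv others frames top mem) (hlen : len ≤ 0x1FF000) :
    Top.FixedLive len others frames' := by
  refine ⟨?_, ?_, ?_, h.globals⟩
  · intro B hB i hi
    have hx := h.blk B hB i hi
    have hoff := fixed_off_stack len hlen B hB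
    obtain ⟨o, ho, hb⟩ := live_others hinv hx (by omega)
    exact ⟨o, List.mem_append_right _ ho, hb⟩
  · intro hp
    refine liveIn_reframe hinv (h.inp hp) hp ?_
    simp only [IN]
    omega
  · refine liveIn_reframe hinv h.out (by simp only [blockOUT]; omega) ?_
    simp only [blockOUT]
    omega

set_option maxRecDepth 8000 in
/-- **The shadow layer after decode_all's epilogue**, for any memory whose shadow is that of the two inline stores: the frame is
popped, the clean stack ends at the entry `rsp + 8` again (`ShadowInv.epilogue_ra`). -/
theorem da_shadow_epilogue {others' : List Obj} {frames : List (Nat × FrameLayout)} {rsp0 top' : Nat} {mem mem' : Mem}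
    (h : ShadowInv others' ((rsp0 - 184, Vorbis.Frames.decode_all) :: frames) top' mem)
    (heq : Mem.EqOn 0xC00000 0xE00000 (storesMem mem ((rsp0 - 184) / 8) Vorbis.Frames.decode_all.epilogue) mem')
    (hra : rsp0 % 8 = 0) (hhi : rsp0 + 8 ≤ 0x800000) (hfr : ∀ bF, bF ∈ frames → rsp0 + 8 ≤ bF.1) :
    ShadowInv others' frames (rsp0 + 8) mem' := by
  have e : Vorbis.Frames.decode_all.raOff = 184 := rfl
  have h' : ShadowInv others' ((rsp0 - Vorbis.Frames.decode_all.raOff, Vorbis.Frames.decode_all) :: frames) top' mem := by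
    rw [e]
    exact h
  have hep := ShadowInv.epilogue_ra (F := Vorbis.Frames.decode_all) (top := rsp0) h' hra hhi hfr
  rw [e] at hep
  exact hep.untouched heq

/-- Every active frame of the caller's list lies at or above the clean region's end (the `hfr` of `da_shadow_epilogue`, from the
entry's `ShadowPre`). -/
theorem da_frames_above {others : List Obj} {frames : List (Nat × FrameLayout)} {top : Nat} {mem : Mem}
    (hinv : ShadowInv others frames top mem) : ∀ bF, bF ∈ frames → top ≤ bF.1 := by
  intro bF hbF
  obtain ⟨_, _, atop, _, _⟩ := hinv.stack.active bF hbF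
  exact atop

/-- **No allocated block is touched by stores into the stack window `[lo, hi)` and the shadow region**: the blocks of the
decode-time predicate lie off the stack region (`DecodeInv.offStack`) and inside the data space (`BlkOK.inside`). With it
`DecodeInv.carry` takes the invariant over a push, a spill, a return address, a store into an object of the own frame. -/
theorem da_allKept_stack_shadow {others : List Obj} {frames : List (Nat × FrameLayout)} {len : Nat} {A : Arena}
    {stored room : Int} {ysz : Nat → Nat} {mem mem' : Mem} {f lo hi : Nat}
    (hdi : DecodeInv others frames len A stored room ysz mem f)
    (hs : Mem.SameExcept [⟨lo, hi⟩, ⟨0xC00000, 0xE00000⟩] mem mem') (hlo : 0x700000 ≤ lo) (hhi : hi ≤ 0x800000) :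
    AllKept (RunBlk A len) mem mem' := by
  refine AllKept.of_sameExcept hdi.ok hs ?_
  intro B hB w hw
  have h1 := hdi.offStack B hB
  have h2 := hdi.ok.inside B hB
  simp only [List.mem_cons, List.not_mem_nil, or_false] at hw
  rcases hw with rfl | rfl
  · simp only []
    omega
  · simp only []
    omega

/-- The value of a non-negative `int` result that arrives zero-extended in rax (stb_vorbis_get_frame_float's post: `0 ≤ s32 rax`,
`rax < 2 ^ 32`): the number in rax itself, below `2 ^ 31`. -/
theorem da_s32_result (w : Word) (h0 : 0 ≤ s32 w) (h1 : w.toNat < 2 ^ 32) : s32 w = (w.toNat : Int) ∧ w.toNat < 2 ^ 31 := by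
  have hp : (Word.part .w32 w).toNat = w.toNat := by
    show (BitVec.setWidth 32 w.toBitVec).toNat = _
    rw [BitVec.toNat_setWidth]
    show w.toNat % 2 ^ 32 = w.toNat
    exact Nat.mod_eq_of_lt h1
  have hc := BitVec.toInt_eq_toNat_cond (Word.part .w32 w)
  have hb : (2 : Nat) ^ Width.w32.bits = 4294967296 := rfl
  rw [hb] at hc
  unfold s32 at h0 ⊢
  split at hc <;> omega

/-! ### PART 2. The cut-point assertions (every one is about the entry state `u` and the present state `s`)

`R` = `u.reg .rsp` (the entry stack pointer: the return address is at `[R]`). Ghosts of the contract: `others frames len`; ghosts of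
the cut points: `others'` (the live non-stack objects after stb_vorbis_open_memory: the old ones and the arena's blocks), and in the
frame loop `A ysz f` (the arena ghost, the `finalY` sizes, the arena copy of the decoder object: stb_vorbis_open_memory's post). -/

/-- The protected frame of this function (base = `R − 184`, objects `error` +32, `ch` +48, `chan` +64, `a` +96). -/
abbrev ownFL : FrameLayout := Vorbis.Frames.decode_all

/-- The frame list inside the function: its own protected frame (base = `R − 184`) in front of the callers'. -/
abbrev ownFrames (u : State) (frames : List (Nat × FrameLayout)) : List (Nat × FrameLayout) :=
  ((u.reg .rsp).toNat - 184, ownFL) :: frames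

/-- **What holds at EVERY cut point after the call of stb_vorbis_open_memory, the epilogue's head included** (steady `rsp` =
`R − 232`: six pushes and `sub rsp, B8H`). The function was entered at `u` by a call (return address `ret`) with its precondition.
In the present state `s`: the return address and the six pushed registers in their slots, `[rsp+10H] = out` (read at 0x103628 and
0x103676 for put_header), the footprint so far (= the contract's: 6448 bytes of stack, OUT, the harness's arena, the shadow,
`crc_table`), the text, the ABI invariant, and `Top.ShadowGrown`'s three clauses FOR THE FRAME LIST WITH THE OWN FRAME (`ownFrames`):
the shadow layer with the clean stack ending at `R − 232`, the fixed objects live, no object in the text.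
NOT here: the shadow index of the frame's base — it is in r13 up to 0x1035bb and from 0x103645 on, and in the slot `[rsp+28H]` in
between (r13d holds `len` in the loop): `AtOpen.r13` / `DBody.slot_sh` / `AtClosed.r13` / `AtEpi.r13`. -/
structure DFrame (others : List Obj) (frames : List (Nat × FrameLayout)) (len : Nat) (u₀ u : State) (ret : Word)
    (others' : List Obj) (s : State) : Prop where
  /-- the function was entered at `u` by a call -/
  entry : AtEntry (conv u₀) L.decode_all.entry (decode_all.spec others frames len).frame ret u
  /-- the precondition at the entry (the shadow layer of the CALLERS' list, the six parameter values, `len ≤ 1FF000H`, …) -/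
  pre : (decode_all.spec others frames len).pre u
  /-- the steady stack pointer -/
  rsp : s.reg .rsp = u.reg .rsp - 232
  /-- `push r15` -/
  slot_r15 : UInt64.ofNat (s.mem.readLE (u.reg .rsp - 8) 8) = u.reg .r15
  /-- `push r14` -/
  slot_r14 : UInt64.ofNat (s.mem.readLE (u.reg .rsp - 16) 8) = u.reg .r14
  /-- `push r13` -/
  slot_r13 : UInt64.ofNat (s.mem.readLE (u.reg .rsp - 24) 8) = u.reg .r13
  /-- `push r12` -/
  slot_r12 : UInt64.ofNat (s.mem.readLE (u.reg .rsp - 32) 8) = u.reg .r12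
  /-- `push rbp` -/
  slot_rbp : UInt64.ofNat (s.mem.readLE (u.reg .rsp - 40) 8) = u.reg .rbp
  /-- `push rbx` -/
  slot_rbx : UInt64.ofNat (s.mem.readLE (u.reg .rsp - 48) 8) = u.reg .rbx
  /-- the return address -/
  slot_ret : UInt64.ofNat (s.mem.readLE (u.reg .rsp) 8) = ret
  /-- `[rsp + 10H] = out` = 400000H (`mov [rsp+10H], rdx` at 0x1034b5) -/
  slot_out : s.mem.readLE (u.reg .rsp - 216) 8 = 0x400000
  /-- the footprint so far: the contract's (`Spec.footprint` of the Spec at `u`, written out) -/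
  same : Mem.SameExcept [⟨(u.reg .rsp).toNat - 6448, (u.reg .rsp).toNat⟩, ⟨0x400000, 0x700000⟩, ⟨0x800000, 0xC00000⟩,
    ⟨0xC00000, 0xE00000⟩, ⟨0x121c00, 0x122000⟩] u.mem s.mem
  /-- the image's text is unchanged -/
  code : (conv u₀).code.In s.mem
  /-- DF = 0, the six SSE exception masks set -/
  inv : (conv u₀).inv s
  /-- the shadow layer with the own frame in front, the clean stack ending at the steady stack pointer -/
  shadow : ShadowInv others' (ownFrames u frames) ((u.reg .rsp).toNat - 232) s.mem
  /-- the fixed objects (IN, OUT, the six globals) are live -/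
  fixed : Top.FixedLive len others' (ownFrames u frames)
  /-- no live non-stack object lies in the image's text -/
  offText : ∀ o, o ∈ others' → L.textHi ≤ o.base

/-- **The assertion at `cut1` = 10357BH** (after the call of stb_vorbis_open_memory; `mov r14, rax`): the frame facts for the
`others'` of the callee's postcondition, `r13` = the shadow index, `rbx = R − 56` (`lea rbx, [rsp+B0H]` at 0x103549: the four
objects are addressed from it), `rbp = dst` = 400020H (`lea rbp, [rdx+20H]` at 0x103545), `[rsp+8] = room` = 786424 =
(300000H − 32) / 4 (0x103551–0x103561), `[rsp+1CH] = len`, and the callee's result: rax = 0, or the decode-time invariant of the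
arena copy `rax` with counters 0 0, for the harness's arena. `*error` (`[R − 152]`) holds any value. -/
structure AtOpen (others : List Obj) (frames : List (Nat × FrameLayout)) (len : Nat) (u₀ u : State) (ret : Word)
    (others' : List Obj) (s : State) : Prop where
  /-- after the call of stb_vorbis_open_memory -/
  rip : s.rip = L.decode_all.cut1
  /-- the frame facts -/
  frame : DFrame others frames len u₀ u ret others' s
  /-- `r13` = the shadow index of the frame's base (`lea r13, [rsp+30H] ; shr r13, 3`; callee-saved) -/
  r13 : s.reg .r13 = (u.reg .rsp - 184) >>> 3
  /-- `rbx = R − 56` -/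
  rbx : s.reg .rbx = u.reg .rsp - 56
  /-- `rbp = out + 32` -/
  rbp : s.reg .rbp = 0x400020
  /-- `[rsp + 8] = room` -/
  slot_room : s.mem.readLE (u.reg .rsp - 224) 8 = 786424
  /-- `[rsp + 1CH] = len` (`mov [rsp+1CH], esi` at 0x1034b1; read at 0x1035c0) -/
  slot_len : s.mem.readLE (u.reg .rsp - 204) 4 = len
  /-- the callee's result -/
  opened : s.reg .rax = 0 ∨
    ∃ (A : Arena) (ysz : Nat → Nat), A.B = 0x800000 ∧ A.L = 0x400000 ∧
      DecodeInv others' (ownFrames u frames) len A 0 0 ysz s.mem (s.reg .rax).toNat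

/-- **What holds at every cut point of the FRAME LOOP** (its head, after stb_vorbis_get_frame_float, its exit): the frame facts,
`rbx`, `rbp`, `r14 = f` (the decoder object: `mov r14, rax` at 0x10357b), `r13d = len` (`mov r13d, [rsp+1CH]` at 0x1035c0,
zero-extended), the shadow index spilled to `[rsp+28H]` (0x1035bb; reloaded at 0x103640), `[rsp+8] = room`, `[rsp] = st` with
`st ≤ room`, and the decode-time invariant of `f` for the harness's arena, WITH THE COUNTERS 0 0 (stb_vorbis_open_memory's post
gives 0 0, every callee keeps its ghosts, and decode_all's post does not mention them: the real counter `st` is kept apart).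
r15 (`frames`), `[rsp+20H]` (channels), `[rsp+24H]` (rate) hold any values (only put_header's value arguments). -/
structure DBody (others : List Obj) (frames : List (Nat × FrameLayout)) (len : Nat) (u₀ u : State) (ret : Word)
    (others' : List Obj) (A : Arena) (ysz : Nat → Nat) (f st : Nat) (s : State) : Prop where
  /-- the frame facts -/
  frame : DFrame others frames len u₀ u ret others' s
  /-- `rbx = R − 56` -/
  rbx : s.reg .rbx = u.reg .rsp - 56
  /-- `rbp = out + 32` -/
  rbp : s.reg .rbp = 0x400020
  /-- `r14 = f` -/
  r14 : (s.reg .r14).toNat = f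
  /-- `r13d = len`, zero-extended -/
  r13 : s.reg .r13 = UInt64.ofNat len
  /-- `[rsp + 28H]` = the shadow index of the frame's base -/
  slot_sh : UInt64.ofNat (s.mem.readLE (u.reg .rsp - 192) 8) = (u.reg .rsp - 184) >>> 3
  /-- `[rsp + 8] = room` -/
  slot_room : s.mem.readLE (u.reg .rsp - 224) 8 = 786424
  /-- `[rsp] = stored` -/
  slot_st : s.mem.readLE (u.reg .rsp - 232) 8 = st
  /-- `stored ≤ room` (copy_frame's post) -/
  st_le : st ≤ 786424
  /-- the arena ghost is the harness's buffer `[800000H, C00000H)` -/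
  arena : A.B = 0x800000 ∧ A.L = 0x400000
  /-- the decode-time invariant in the present memory, for the list with the own frame, counters 0 0 -/
  dinv : DecodeInv others' (ownFrames u frames) len A 0 0 ysz s.mem f

/-- **The assertion at the head `loop1` = 1035C5H of the frame loop** (`cmp r12d, r13d`), round `k`: the loop facts and `r12d = k`
(`mov r12d, 0` at 0x1035a7, `add r12d, 1` at 0x103603: zero-extended), `k ≤ len`. -/
structure AtLoop (others : List Obj) (frames : List (Nat × FrameLayout)) (len : Nat) (u₀ u : State) (ret : Word)
    (others' : List Obj) (A : Arena) (ysz : Nat → Nat) (f k st : Nat) (s : State) : Prop where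
  /-- at the loop head -/
  rip : s.rip = L.decode_all.loop1
  /-- the loop facts -/
  body : DBody others frames len u₀ u ret others' A ysz f st s
  /-- `r12d = k`, zero-extended -/
  r12 : s.reg .r12 = UInt64.ofNat k
  /-- `k ≤ len` (the measure of the loop is `len − k`) -/
  k_le : k ≤ len

/-- **The assertion at `cut3` = 1035DAH** (after the call of stb_vorbis_get_frame_float; `mov r9d, eax`): as at the head with
`k < len` (the `jge` at 0x1035c8 was not taken), and the callee's result `n` in eax (zero-extended, a non-negative `int`) with
`Top.FrameOut` for the two objects `ch` = `R − 136` (`rbx − 50H`) and `chan` = `R − 120` (`rbx − 40H`) if `n ≠ 0`. -/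
structure AtGot (others : List Obj) (frames : List (Nat × FrameLayout)) (len : Nat) (u₀ u : State) (ret : Word)
    (others' : List Obj) (A : Arena) (ysz : Nat → Nat) (f k st n : Nat) (s : State) : Prop where
  /-- after the call of stb_vorbis_get_frame_float -/
  rip : s.rip = L.decode_all.cut3
  /-- the loop facts -/
  body : DBody others frames len u₀ u ret others' A ysz f st s
  /-- `r12d = k`, zero-extended -/
  r12 : s.reg .r12 = UInt64.ofNat k
  /-- `k < len` -/
  k_lt : k < len
  /-- `rax = n`, zero-extended -/
  rax : s.reg .rax = UInt64.ofNat n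
  /-- `n` is a non-negative `int` -/
  n_lt : n < 2 ^ 31
  /-- what the callee promises for a non-zero result -/
  out : n ≠ 0 → Top.FrameOut s.mem f ((u.reg .rsp).toNat - 136) ((u.reg .rsp).toNat - 120) (n : Int)

/-- **The assertion at the loop's exit 103640H** (`mov r13, [rsp+28H]`; label `at_103640`; reached from the `jge` at 0x1035c8 —
`k ≥ len` — and from the `je` at 0x1035df — `n = 0`): the loop facts; r12 is dead. -/
structure AtDone (others : List Obj) (frames : List (Nat × FrameLayout)) (len : Nat) (u₀ u : State) (ret : Word)
    (others' : List Obj) (A : Arena) (ysz : Nat → Nat) (f st : Nat) (s : State) : Prop where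
  /-- at the loop's exit -/
  rip : s.rip = L.decode_all.at_103640
  /-- the loop facts -/
  body : DBody others frames len u₀ u ret others' A ysz f st s

/-- **The assertion at `cut7` = 103658H** (after the call of stb_vorbis_close; `mov edx, [rbx−60H]`): the frame facts, `r13` = the
shadow index again (reloaded at 0x103640), `rbx`, `[rsp] = st ≤ room`. The decoder object is gone (no invariant is needed any
more); `*error`, r15, `[rsp+20H]`, `[rsp+24H]` hold any values. -/
structure AtClosed (others : List Obj) (frames : List (Nat × FrameLayout)) (len : Nat) (u₀ u : State) (ret : Word)
    (others' : List Obj) (st : Nat) (s : State) : Prop where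
  /-- after the call of stb_vorbis_close -/
  rip : s.rip = L.decode_all.cut7
  /-- the frame facts -/
  frame : DFrame others frames len u₀ u ret others' s
  /-- `r13` = the shadow index of the frame's base -/
  r13 : s.reg .r13 = (u.reg .rsp - 184) >>> 3
  /-- `rbx = R − 56` -/
  rbx : s.reg .rbx = u.reg .rsp - 56
  /-- `[rsp] = stored` -/
  slot_st : s.mem.readLE (u.reg .rsp - 232) 8 = st
  /-- `stored ≤ room` -/
  st_le : st ≤ 786424

/-- **The assertion at the epilogue's head `at_10351d`** (`mov qword [r13+C00000H], 0`; reached from 0x10363b with eax = 32 — open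
failed — and from 0x10368c with rax = 32 + 4·stored; the third predecessor 0x103518, `cap < 32`, is dead): the frame facts, `r13` =
the shadow index, and the contract's bounds of the result. rbx, rbp, r12, r14, r15 are dead (popped). -/
structure AtEpi (others : List Obj) (frames : List (Nat × FrameLayout)) (len : Nat) (u₀ u : State) (ret : Word)
    (others' : List Obj) (s : State) : Prop where
  /-- at the epilogue's head -/
  rip : s.rip = L.decode_all.at_10351d
  /-- the frame facts -/
  frame : DFrame others frames len u₀ u ret others' s
  /-- `r13` = the shadow index of the frame's base -/
  r13 : s.reg .r13 = (u.reg .rsp - 184) >>> 3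
  /-- `32 ≤ rax` -/
  rax_lo : 32 ≤ (s.reg .rax).toNat
  /-- `rax ≤ 300000H` (`32 + 4·786424`) -/
  rax_hi : (s.reg .rax).toNat ≤ 0x300000

/-! ### PART 3. The segments -/

/-- **Segment 1, 1034A0H–103516H + 103545H–103576H** (shim.c 58–73: the prologue — six pushes, `sub rsp, B8H`, two spills, the three
frame header words, the four inline shadow stores: `da_shadow_prologue` —, `error = 0`, the test `cap < 32` (DEAD: rcx = 300000H by
the precondition; the arm 0x103518 is pruned at the `jg`), `room`, `a = {arena, arena_len}`, the call of stb_vorbis_open_memory with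
`&error`, `&a` live objects of the own frame): from the function's entry with its precondition to `cut1`. -/
def Seg1 (Lay : Layout) (μ : Microarch) (u₀ : State) : Prop :=
  ∀ (others : List Obj) (frames : List (Nat × FrameLayout)) (len : Nat) (u : State) (ret : Word),
    AtEntry (conv u₀) L.decode_all.entry (decode_all.spec others frames len).frame ret u →
    (decode_all.spec others frames len).pre u →
    ReachVia Lay μ WayInv u (fun s => ∃ others' : List Obj, AtOpen others frames len u₀ u ret others' s)

/-- **Segment 2, 10357BH–1035C0H + 103609H–10363BH** (shim.c 74–83): from `cut1`, either (rax ≠ 0) `channels = v->channels`,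
`rate = v->sample_rate` (two checked loads of `*f`: `DecodeInv.objLive`), `k = 0`, `frames = 0`, `stored = 0`, the shadow index
spilled, `r13d = len`: to the loop head with `k = 0`, `st = 0`; or (rax = 0) `put_header(hdr, error, 0, 0, 0, 0, 0)` (the seventh
argument pushed; OUT's first 32 bytes live by `DFrame.fixed`), `eax = 32`: to the epilogue's head. -/
def Seg2 (Lay : Layout) (μ : Microarch) (u₀ : State) : Prop :=
  ∀ (others : List Obj) (frames : List (Nat × FrameLayout)) (len : Nat) (u : State) (ret : Word) (others' : List Obj)
      (v : State),
    AtOpen others frames len u₀ u ret others' v →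
    ReachVia Lay μ WayInv v (fun s =>
      (∃ (A : Arena) (ysz : Nat → Nat) (f : Nat), AtLoop others frames len u₀ u ret others' A ysz f 0 0 s) ∨
      AtEpi others frames len u₀ u ret others' s)

/-- **Segment 3, 1035C5H–1035D5H** (shim.c 83–86): from the loop head at `k`: the test; then (`k < len`) the call of
stb_vorbis_get_frame_float with `&ch`, `&chan` live objects of the own frame (`da_stackObj`), to `cut3`; or (`k ≥ len`) the loop's
exit. -/
def Seg3 (Lay : Layout) (μ : Microarch) (u₀ : State) : Prop :=
  ∀ (others : List Obj) (frames : List (Nat × FrameLayout)) (len : Nat) (u : State) (ret : Word) (others' : List Obj)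
      (A : Arena) (ysz : Nat → Nat) (f k st : Nat) (v : State),
    AtLoop others frames len u₀ u ret others' A ysz f k st v →
    ReachVia Lay μ WayInv v (fun s =>
      (∃ n : Nat, AtGot others frames len u₀ u ret others' A ysz f k st n s) ∨
      AtDone others frames len u₀ u ret others' A ysz f st s)

/-- **Segment 4, 1035DAH–103607H** (shim.c 87–91): from `cut3`: (`n = 0`) the loop's exit; or `frames += n`, the call of
copy_frame (its precondition: the `example` of Vorbis/Spec/TopCheck.lean — `outputs_live`, OUT and the arena do not meet), `stored
= rax`, `k + 1`: back to the head at `k + 1` with the new `st'`.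
`DBody.dinv` after copy_frame's stores into OUT: `da_out_stores`, its hypothesis `hmiss` by `da_reads_ne_out` from `DecodeInv.cfg`. -/
def Seg4 (Lay : Layout) (μ : Microarch) (u₀ : State) : Prop :=
  ∀ (others : List Obj) (frames : List (Nat × FrameLayout)) (len : Nat) (u : State) (ret : Word) (others' : List Obj)
      (A : Arena) (ysz : Nat → Nat) (f k st n : Nat) (v : State),
    AtGot others frames len u₀ u ret others' A ysz f k st n v →
    ReachVia Lay μ WayInv v (fun s =>
      (∃ st' : Nat, AtLoop others frames len u₀ u ret others' A ysz f (k + 1) st' s) ∨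
      AtDone others frames len u₀ u ret others' A ysz f st s)

/-- **Segment 5, 103640H–103653H** (shim.c 93–94): the shadow index reloaded into r13, `error = stb_vorbis_get_error(v)` (its store
into `f->error`, a decode-time hole, keeps `VorbisOK`), `stb_vorbis_close(v)` (`DeinitOK` from `VorbisOK`, `Blk := RunBlk A len`;
it writes nothing but stack): from the loop's exit to `cut7`. -/
def Seg5 (Lay : Layout) (μ : Microarch) (u₀ : State) : Prop :=
  ∀ (others : List Obj) (frames : List (Nat × FrameLayout)) (len : Nat) (u : State) (ret : Word) (others' : List Obj)
      (A : Arena) (ysz : Nat → Nat) (f st : Nat) (v : State),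
    AtDone others frames len u₀ u ret others' A ysz f st v →
    ReachVia Lay μ WayInv v (AtClosed others frames len u₀ u ret others' st)

/-- **Segment 6, 103658H–10368CH** (shim.c 95–96): `put_header(hdr, 0, error, channels, rate, frames, stored)` (the seventh argument
pushed), `rax = 32 + 4·stored` (`lea rax, [rbx*4+20H]`; `st ≤ 786424` gives `rax ≤ 300000H`): from `cut7` to the epilogue's head. -/
def Seg6 (Lay : Layout) (μ : Microarch) (u₀ : State) : Prop :=
  ∀ (others : List Obj) (frames : List (Nat × FrameLayout)) (len : Nat) (u : State) (ret : Word) (others' : List Obj)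
      (st : Nat) (v : State),
    AtClosed others frames len u₀ u ret others' st v →
    ReachVia Lay μ WayInv v (AtEpi others frames len u₀ u ret others')

/-- **Segment 7, 10351DH–103544H** (the single epilogue: the two inline shadow stores that zero the frame's red zones —
`da_shadow_epilogue` —, `add rsp, B8H`, six pops, `ret`; the fixed objects live for the callers' list again by
`da_fixedLive_reframe`): from the epilogue's head to the state after the `ret`: the contract's `Returned`. -/
def Seg7 (Lay : Layout) (μ : Microarch) (u₀ : State) : Prop :=
  ∀ (others : List Obj) (frames : List (Nat × FrameLayout)) (len : Nat) (u : State) (ret : Word) (others' : List Obj)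
      (v : State),
    AtEpi others frames len u₀ u ret others' v →
    ReachVia Lay μ WayInv v (Returned (conv u₀) (decode_all.spec others frames len) u ret)

end Vorbis.Spec.decode_all
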